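-- pv_equiv track=rewrite | github.com/GustavoGAyala/EstructuraDeDatos | trabajo-practico-los-elonbots/src/expresiones.py | agregar_espacios_en_parentesis
-- ===== SOURCE A (Python) =====
-- def agregar_espacios_en_parentesis(expresion):
--     i = 0
--     res = ""
--     while i < len(expresion):
--         if expresion[i:i+1] == "(" or expresion[i:i+1] == ")":
--             if expresion[i:i+1] == "(" :
--                 res += expresion[i:i+1] + ' '
--             if expresion[i:i+1] == ")":
--                 res += ' '  + expresion[i:i+1]
--         else:
--             res += expresion[i:i+1]
--         i += 1
--     return res
-- ===== SOURCE B (Python) =====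
-- def agregar_espacios_en_parentesis(expresion):
--     return expresion.replace("(", "( ").replace(")", " )")
-- ===== Notes on version B (the rewrite author's own statement) =====
-- stated objective: faster
-- what changed: Replaces the manual index/accumulator while-loop (quadratic repeated string concatenation) with two linear str.replace library passes: one inserting a space after each '(' and one inserting a space before each ')'.
import Mathlib
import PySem

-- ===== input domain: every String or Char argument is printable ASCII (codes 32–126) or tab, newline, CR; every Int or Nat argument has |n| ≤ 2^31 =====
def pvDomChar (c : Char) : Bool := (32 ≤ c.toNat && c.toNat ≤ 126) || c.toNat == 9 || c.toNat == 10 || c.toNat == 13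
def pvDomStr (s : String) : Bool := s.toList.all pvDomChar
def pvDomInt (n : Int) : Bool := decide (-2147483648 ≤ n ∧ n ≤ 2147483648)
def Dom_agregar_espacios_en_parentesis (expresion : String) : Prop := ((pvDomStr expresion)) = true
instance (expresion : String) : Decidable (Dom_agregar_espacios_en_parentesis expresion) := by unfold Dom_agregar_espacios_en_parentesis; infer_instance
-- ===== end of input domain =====

-- B: two str.replace library passes instead of A's manual index/accumulator while-loop (idiomatic; return value only).


-- ===== PORT A =====
-- the while-loop over i: for 0 ≤ i < len, the slice expresion[i:i+1] is exactly the i-th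
-- character, so the loop is transcribed as structural recursion over the remaining characters
-- with the same `res` accumulator and the same branch order (exact on this domain).
def agregar_espacios_en_parentesis_go : List Char → List Char → List Char
  | res, [] => res
  | res, c :: rest =>
    if c = '(' ∨ c = ')' then
      -- the two inner ifs of A, in order
      let res := if c = '(' then res ++ [c, ' '] else res
      let res := if c = ')' then res ++ [' ', c] else res
      agregar_espacios_en_parentesis_go res rest
    else
      agregar_espacios_en_parentesis_go (res ++ [c]) rest

def agregar_espacios_en_parentesis (expresion : String) : String :=
  String.ofList (agregar_espacios_en_parentesis_go [] expresion.toList)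

-- ===== PORT B =====
def agregar_espacios_en_parentesis_alt (expresion : String) : String :=
  PySem.Str.replace (PySem.Str.replace expresion "(" "( ") ")" " )"

-- ===== PRECONDITION & SPEC =====
def Spec_agregar_espacios_en_parentesis (expresion : String) (out : String) : Prop := out = agregar_espacios_en_parentesis_alt expresion
instance (expresion : String) (out : String) : Decidable (Spec_agregar_espacios_en_parentesis expresion out) := by unfold Spec_agregar_espacios_en_parentesis; infer_instance

-- ===== CLAIM (what is proved, stated in full; the proofs are below) =====
def Claim_equal_agregar_espacios_en_parentesis : Prop := ∀ (expresion : String), Dom_agregar_espacios_en_parentesis expresion → Spec_agregar_espacios_en_parentesis expresion (agregar_espacios_en_parentesis expresion)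

-- ===== LEMMAS AND PROOFS =====

/-- the per-character expansion both programs implement -/
def pvParenF (c : Char) : List Char :=
  if c = '(' then ['(', ' '] else if c = ')' then [' ', ')'] else [c]

lemma goA_eq (l res : List Char) :
    agregar_espacios_en_parentesis_go res l = res ++ l.flatMap pvParenF := by
  induction l generalizing res with
  | nil => simp [agregar_espacios_en_parentesis_go]
  | cons c rest ih =>
    simp only [agregar_espacios_en_parentesis_go, List.flatMap_cons]
    by_cases h1 : c = '('
    · simp [h1, ih, pvParenF]
    · by_cases h2 : c = ')'
      · simp [h2, ih, pvParenF]
      · simp [h1, h2, ih, pvParenF]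

/-- single-character replace is a flatMap -/
lemma replace_go_single (o : Char) (new : List Char) (l : List Char) (fuel : Nat) (acc : List Char)
    (h : l.length ≤ fuel) :
    PySem.Chars.replace.go [o] new fuel l acc
      = acc.reverse ++ l.flatMap (fun c => if c = o then new else [c]) := by
  induction l generalizing fuel acc with
  | nil => cases fuel <;> simp [PySem.Chars.replace.go]
  | cons c rest ih =>
    cases fuel with
    | zero => simp at h
    | succ f =>
      simp only [List.length_cons, Nat.succ_le_succ_iff] at h
      by_cases hc : c = o
      · have hpre : List.isPrefixOf [o] (c :: rest) = true := by
          simp [List.isPrefixOf, hc]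
        simp [PySem.Chars.replace.go, hc, ih _ _ h, List.flatMap_cons]
      · have hpre : List.isPrefixOf [o] (c :: rest) = false := by
          simp [List.isPrefixOf]; exact fun h => absurd h.symm hc
        simp [PySem.Chars.replace.go, hpre, hc, ih _ _ h, List.flatMap_cons]

lemma replace_single (o : Char) (new : List Char) (l : List Char) :
    PySem.Chars.replace l [o] new = l.flatMap (fun c => if c = o then new else [c]) := by
  simp [PySem.Chars.replace, replace_go_single o new l l.length [] le_rfl]

lemma altList (s : String) :
    (agregar_espacios_en_parentesis_alt s).toList = s.toList.flatMap pvParenF := by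
  simp only [agregar_espacios_en_parentesis_alt, PySem.Str.toList_replace]
  rw [show ("(" : String).toList = ['('] from rfl, show (")" : String).toList = [')'] from rfl,
      show ("( " : String).toList = ['(', ' '] from rfl, show (" )" : String).toList = [' ', ')'] from rfl,
      replace_single, replace_single, List.flatMap_assoc]
  apply List.flatMap_congr
  intro c _
  by_cases h1 : c = '(' <;> by_cases h2 : c = ')' <;>
    simp_all [pvParenF]

-- ===== VERDICT (by name: the statement is the Claim_ definition above) =====
theorem agregar_espacios_en_parentesis_spec : Claim_equal_agregar_espacios_en_parentesis := by
  intro s _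
  show _ = _
  have h : (agregar_espacios_en_parentesis s).toList = (agregar_espacios_en_parentesis_alt s).toList := by
    simp [agregar_espacios_en_parentesis, goA_eq, altList]
  calc agregar_espacios_en_parentesis s
      = String.ofList (agregar_espacios_en_parentesis s).toList := by simp
    _ = String.ofList (agregar_espacios_en_parentesis_alt s).toList := by rw [h]
    _ = agregar_espacios_en_parentesis_alt s := by simp
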